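-- pv_equiv track=rewrite | github.com/aishwarya1304/fake-news-streamlit | src/preprocessing.py | contains_spam_words
-- ===== SOURCE A (Python) =====
-- def contains_spam_words(text):
--     """
--     Check if text contains spam/clickbait words
--
--     Args:
--         text (str): Input text
--
--     Returns:
--         bool: True if contains spam words
--     """
--     spam_words = [
--         'shocking', 'breaking', 'urgent', 'click here', 'limited time',
--         'act now', 'you won\'t believe', 'amazing', 'incredible',
--         'miracle', 'secret', 'doctors hate', 'banned forever',
--         'share this', 'forward now', 'bad luck', 'free money',
--         'one weird trick', 'celebrities reveal', 'doctors shocked'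
--     ]
--
--     text_lower = text.lower()
--     return any(spam_word in text_lower for spam_word in spam_words)
-- ===== SOURCE B (Python) =====
-- def contains_spam_words(text):
--     """
--     Check if text contains spam/clickbait words (single left-to-right scan:
--     at each position test whether some phrase starts there).
--     """
--     spam_words = [
--         'shocking', 'breaking', 'urgent', 'click here', 'limited time',
--         'act now', 'you won\'t believe', 'amazing', 'incredible',
--         'miracle', 'secret', 'doctors hate', 'banned forever',
--         'share this', 'forward now', 'bad luck', 'free money',
--         'one weird trick', 'celebrities reveal', 'doctors shocked'
--     ]
--     t = text.lower()
--     for i in range(len(t) + 1):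
--         for w in spam_words:
--             if t.startswith(w, i):
--                 return True
--     return False
-- ===== Notes on version B (the rewrite author's own statement) =====
-- stated objective: alternative
-- what changed: Replaces the per-phrase repeated substring searches (one full scan of the text per phrase) with a single left-to-right scan over the lowercased text that tests at each position whether any spam phrase starts there.
import Mathlib
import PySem

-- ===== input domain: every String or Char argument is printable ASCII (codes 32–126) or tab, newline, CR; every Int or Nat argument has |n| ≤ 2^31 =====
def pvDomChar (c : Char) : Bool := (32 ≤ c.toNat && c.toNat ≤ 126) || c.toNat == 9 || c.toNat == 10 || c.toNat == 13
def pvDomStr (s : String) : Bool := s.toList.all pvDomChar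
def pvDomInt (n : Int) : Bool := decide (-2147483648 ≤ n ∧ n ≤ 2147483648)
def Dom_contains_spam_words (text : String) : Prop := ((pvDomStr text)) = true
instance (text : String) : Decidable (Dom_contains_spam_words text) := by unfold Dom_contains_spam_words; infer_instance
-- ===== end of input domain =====

-- B replaces A's per-phrase substring searches by a single left-to-right scan that
-- tests, at each position of the lowercased text, whether any spam phrase starts there
-- (objective: alternative algorithm, same cost class).

-- ===== PORT A =====
def spamWordsA : List String :=
  ["shocking", "breaking", "urgent", "click here", "limited time",
   "act now", "you won't believe", "amazing", "incredible",
   "miracle", "secret", "doctors hate", "banned forever",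
   "share this", "forward now", "bad luck", "free money",
   "one weird trick", "celebrities reveal", "doctors shocked"]

def contains_spam_words (text : String) : Bool :=
  let text_lower := PySem.Str.lower text
  spamWordsA.any (fun w => PySem.Str.isIn w text_lower)

-- ===== PORT B =====
def spamWordsB : List String :=
  ["shocking", "breaking", "urgent", "click here", "limited time",
   "act now", "you won't believe", "amazing", "incredible",
   "miracle", "secret", "doctors hate", "banned forever",
   "share this", "forward now", "bad luck", "free money",
   "one weird trick", "celebrities reveal", "doctors shocked"]

-- the scan: for each suffix of the text (position i), test whether some phrase starts there
def scanSpam (ws : List (List Char)) : List Char → Bool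
  | [] => ws.any (fun w => PySem.Chars.startswith [] w)
  | c :: rest => ws.any (fun w => PySem.Chars.startswith (c :: rest) w) || scanSpam ws rest

def contains_spam_words_alt (text : String) : Bool :=
  scanSpam (spamWordsB.map String.toList) (PySem.Str.lower text).toList

-- ===== PRECONDITION & SPEC =====
def Spec_contains_spam_words (text : String) (out : Bool) : Prop := out = contains_spam_words_alt text
instance (text : String) (out : Bool) : Decidable (Spec_contains_spam_words text out) := by unfold Spec_contains_spam_words; infer_instance

-- ===== CLAIM (what is proved, stated in full; the proofs are below) =====
def Claim_equal_contains_spam_words : Prop := ∀ (text : String), Dom_contains_spam_words text → Spec_contains_spam_words text (contains_spam_words text)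

-- ===== LEMMAS AND PROOFS =====
theorem scanSpam_iff (ws : List (List Char)) (cs : List Char) :
    scanSpam ws cs = true ↔ ∃ w ∈ ws, ∃ t, t <:+ cs ∧ w <+: t := by
  induction cs with
  | nil =>
      simp [scanSpam, List.any_eq_true, PySem.Chars.startswith_iff, List.suffix_nil]
  | cons c rest ih =>
      simp only [scanSpam, Bool.or_eq_true, List.any_eq_true, PySem.Chars.startswith_iff, ih]
      constructor
      · rintro (⟨w, hw, hp⟩ | ⟨w, hw, t, ht, hp⟩)
        · exact ⟨w, hw, c :: rest, List.suffix_refl _, hp⟩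
        · exact ⟨w, hw, t, ht.trans (List.suffix_cons c rest), hp⟩
      · rintro ⟨w, hw, t, ht, hp⟩
        rcases (List.suffix_cons_iff.mp ht) with h | h
        · exact Or.inl ⟨w, hw, h ▸ hp⟩
        · exact Or.inr ⟨w, hw, t, h, hp⟩

-- ===== VERDICT (by name: the statement is the Claim_ definition above) =====
theorem contains_spam_words_spec : Claim_equal_contains_spam_words := by
  intro text _
  unfold Spec_contains_spam_words contains_spam_words contains_spam_words_alt
  have hW : spamWordsA = spamWordsB := rfl
  rw [hW]
  refine Bool.eq_iff_iff.mpr ?_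
  rw [scanSpam_iff]
  simp only [List.any_eq_true, PySem.Str.isIn_iff_infix, List.infix_iff_prefix_suffix,
    List.mem_map]
  constructor
  · rintro ⟨w, hw, t, hp, hs⟩
    exact ⟨w.toList, ⟨w, hw, rfl⟩, t, hs, hp⟩
  · rintro ⟨wl, ⟨w, hw, rfl⟩, t, hs, hp⟩
    exact ⟨w, hw, t, hp, hs⟩
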